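-- pv_equiv track=rewrite | github.com/willda/google_foobar | 1c.py | solution
-- ===== SOURCE A (Python) =====
-- def to_base(n, base):
--     table = "0123456789"
--     if n < base:
--         return table[n]
--     else:
--         return to_base(n // base, base) + table[n % base]
--
-- def solution(n,b):
--     iterations = 0
--     z = None
--     hist = {n: 0}
--
--     while n != 0:
--         iterations += 1
--         x = ''.join(sorted(n, reverse = True))
--         y = ''.join(sorted(n))
--         z = int(x, b) - int(y, b)
--         z = to_base(z, b).zfill(len(n))
--
--         if z in hist:
--             return iterations - hist[z]
--
--         hist[z] = iterations
--         n = z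
--
--     return 1
-- ===== SOURCE B (Python) =====
-- # Same cycle length as A, but found with Floyd's tortoise-and-hare instead of a
-- # history dictionary: O(1) memory, no hash table.
--
-- def _step(s, b):
--     x = int(''.join(sorted(s, reverse=True)), b)
--     y = int(''.join(sorted(s)), b)
--     z = x - y
--     digits = []
--     while z:
--         digits.append("0123456789"[z % b])
--         z //= b
--     t = ''.join(reversed(digits)) or "0"
--     return t.zfill(len(s))
--
-- def solution(n, b):
--     slow = _step(n, b)
--     fast = _step(slow, b)
--     while slow != fast:
--         slow = _step(slow, b)
--         fast = _step(_step(fast, b), b)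
--     cnt = 1
--     p = _step(slow, b)
--     while p != slow:
--         p = _step(p, b)
--         cnt += 1
--     return cnt
-- ===== Notes on version B (the rewrite author's own statement) =====
-- stated objective: alternative
-- what changed: Replaces A's grow-forever history dictionary with Floyd's tortoise-and-hare cycle detection (constant memory, no hash table), plus an iterative digit loop instead of A's recursive to_base.
-- outside the precondition, e.g. on solution(' 7', 10): A returns 1, B returns 1; on solution('11', 12): A returns 1, B returns 1
import Mathlib
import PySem

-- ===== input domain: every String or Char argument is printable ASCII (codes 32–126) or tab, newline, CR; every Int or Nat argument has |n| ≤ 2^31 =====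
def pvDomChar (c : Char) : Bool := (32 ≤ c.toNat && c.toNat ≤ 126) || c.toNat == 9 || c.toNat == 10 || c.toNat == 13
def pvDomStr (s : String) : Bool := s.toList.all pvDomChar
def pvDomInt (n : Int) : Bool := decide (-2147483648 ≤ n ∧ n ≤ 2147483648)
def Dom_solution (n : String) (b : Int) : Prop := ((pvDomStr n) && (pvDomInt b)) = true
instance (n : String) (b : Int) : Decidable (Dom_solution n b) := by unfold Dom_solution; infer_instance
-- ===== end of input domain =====

-- B replaces A's grow-forever history dictionary with Floyd's tortoise-and-hare cycle
-- detection (constant memory, no hash table); the proved equivalence is on Pre_solution.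

-- ===== PORT A =====

-- digit value of a char ('0'..'9' → 0..9)
def dv (c : Char) : Nat := c.toNat - 48

-- the string "0123456789" that A indexes into (table[...])
def tableC : List Char := ['0','1','2','3','4','5','6','7','8','9']

-- port of int(s, base), shared by both ports (each Python side calls int(_, b)).
-- Exact on the inputs reachable under Pre_solution: nonempty strings of digits '0'..'9'
-- below the base, with 2 ≤ b ≤ 10 (Python's int() additionally accepts whitespace, sign,
-- underscores and letter digits, none of which occur under Pre_solution; elsewhere = none/raise).
def parseBase? (cs : List Char) (b : Int) : Option Int :=
  if 2 ≤ b ∧ b ≤ 36 then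
    if cs = [] then none
    else cs.foldl (fun acc c =>
      match acc with
      | some a => if ('0' ≤ c ∧ c ≤ '9') ∧ (dv c : Int) < b then some (a * b + (dv c : Int)) else none
      | none => none) (some (0:Int))
  else none

-- ''.join(sorted(s, reverse=True)) and ''.join(sorted(s)), on char lists
def sortDesc (cs : List Char) : List Char := PySem.List.sorted cs (fun c => c) true
def sortAsc (cs : List Char) : List Char := PySem.List.sorted cs (fun c => c)

-- port of A's recursive to_base (fuel = recursion depth bound; none = Python raises/diverges)
def toBaseA (b : Int) : Nat → Int → Option (List Char)
  | 0, _ => none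
  | fuel+1, nn =>
    if nn < b then (PySem.List.pyGet? tableC nn).map (fun c => [c])
    else
      match toBaseA b fuel (PySem.Int.floordiv nn b), PySem.List.pyGet? tableC (PySem.Int.mod nn b) with
      | some s, some c => some (s ++ [c])
      | _, _ => none

-- A's while-loop ('while n != 0' compares a str to the int 0, hence is always True in Python)
def loopA (b : Int) : Nat → List Char → PySem.Dict (List Char) Int → Int → Int
  | 0, _, _, _ => 0
  | fuel+1, cur, hist, iters =>
      let iters' := iters + 1
      match parseBase? (sortDesc cur) b, parseBase? (sortAsc cur) b with
      | some vx, some vy =>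
        let z := vx - vy
        match toBaseA b (z.toNat + 1) z with
        | some zc =>
          let zs := PySem.Chars.zfill zc (cur.length : Int)
          match hist.get? zs with
          | some j => iters' - j
          | none => loopA b fuel zs (hist.insert zs iters') iters'
        | none => 0
      | _, _ => 0

def solution (n : String) (b : Int) : Int :=
  loopA b (10 ^ n.toList.length + 2) n.toList (PySem.Dict.empty.insert n.toList 0) 0

-- ===== PORT B =====

-- B's iterative digit loop (while z: digits.append(table[z % b]); z //= b)
def digitsB (b : Int) : Nat → Int → List Char → Option (List Char)
  | 0, _, _ => none
  | fuel+1, z, acc =>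
    if z ≠ 0 then
      match PySem.List.pyGet? tableC (PySem.Int.mod z b) with
      | some c => digitsB b fuel (PySem.Int.floordiv z b) (acc ++ [c])
      | none => none
    else some acc

-- B's _step(s, b)
def stepB (b : Int) (s : List Char) : Option (List Char) :=
  match parseBase? (sortDesc s) b, parseBase? (sortAsc s) b with
  | some vx, some vy =>
    (digitsB b ((vx - vy).toNat + 1) (vx - vy) []).map (fun ds =>
      let t := ds.reverse
      let t := if t = [] then ['0'] else t
      PySem.Chars.zfill t (s.length : Int))
  | _, _ => none

-- tortoise-and-hare meeting loop
def floyd1 (b : Int) : Nat → List Char → List Char → Option (List Char)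
  | 0, _, _ => none
  | fuel+1, slow, fast =>
    if slow = fast then some slow
    else
      match stepB b slow, (stepB b fast).bind (stepB b) with
      | some s', some f' => floyd1 b fuel s' f'
      | _, _ => none

-- cycle-length counting loop
def floyd2 (b : Int) : Nat → List Char → List Char → Int → Int
  | 0, _, _, _ => 0
  | fuel+1, p, m, cnt =>
    if p ≠ m then
      match stepB b p with
      | some q => floyd2 b fuel q m (cnt + 1)
      | none => 0
    else cnt

def solution_alt (n : String) (b : Int) : Int :=
  let F := (10 ^ n.toList.length + 2) * (10 ^ n.toList.length + 2)
  match stepB b n.toList with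
  | none => 0
  | some slow =>
    match stepB b slow with
    | none => 0
    | some fast =>
      match floyd1 b F slow fast with
      | none => 0
      | some m =>
        match stepB b m with
        | some p => floyd2 b F p m 1
        | none => 0

-- ===== PRECONDITION & SPEC =====

-- Pre_ keeps the natural domain: nonempty all-digit strings below the base with 2 ≤ b ≤ 10;
-- on other printable inputs A usually raises (ValueError from int(), IndexError in to_base
-- for bases above 10), though a few such forms (whitespace/sign/underscore strings, some
-- bases > 10) do return — those are excluded here and cited in the claim.
def Pre_solution (n : String) (b : Int) : Prop :=
  2 ≤ b ∧ b ≤ 10 ∧ n.toList ≠ [] ∧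
  n.toList.all (fun c => decide ('0' ≤ c) && decide (c ≤ '9') && decide ((dv c : Int) < b)) = true

instance (n : String) (b : Int) : Decidable (Pre_solution n b) := by
  unfold Pre_solution; infer_instance

def pvWitness_solution : String × Int := ("174", 10)

def Spec_solution (n : String) (b : Int) (out : Int) : Prop := out = solution_alt n b
instance (n : String) (b : Int) (out : Int) : Decidable (Spec_solution n b out) := by
  unfold Spec_solution; infer_instance

-- ===== CLAIM (what is proved, stated in full; the proofs are below) =====
def Claim_equal_solution : Prop := ∀ (n : String) (b : Int), Dom_solution n b → Pre_solution n b → Spec_solution n b (solution n b)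

-- ===== LEMMAS AND PROOFS =====

-- valid digit string for base b
def validS (b : Int) (s : List Char) : Prop :=
  s ≠ [] ∧ ∀ c ∈ s, '0' ≤ c ∧ c ≤ '9' ∧ (dv c : Int) < b

-- base-B value of a digit list
def valN (B : Nat) (l : List Nat) : Nat := l.foldl (fun a d => a * B + d) 0

def NxV (B : Nat) (s : List Char) : Nat := valN B ((sortDesc s).map dv)
def NyV (B : Nat) (s : List Char) : Nat := valN B ((sortAsc s).map dv)

-- canonical base-B digit string of m (what to_base computes)
def canon (B m : Nat) : List Char :=
  if m < B then [Nat.digitChar m]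
  else if h : 2 ≤ B then canon B (m / B) ++ [Nat.digitChar (m % B)] else []
termination_by m
decreasing_by exact Nat.div_lt_self (by omega) (by omega)

-- the pure step function both loops compute
def fstep (B : Nat) (s : List Char) : List Char :=
  PySem.Chars.zfill (canon B (NxV B s - NyV B s)) (s.length : Int)

def orbS (B : Nat) (s0 : List Char) (i : Nat) : List Char := (fstep B)^[i] s0

-- 'index k is a repeat of an earlier index'
def RepP (B : Nat) (s0 : List Char) (k : Nat) : Prop :=
  ∃ j, j < k ∧ orbS B s0 j = orbS B s0 k


-- ---- base-B values of digit lists ----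

theorem foldl_val_lt (B : Nat) (l : List Nat) (hl : ∀ d ∈ l, d < B) (a : Nat) :
    l.foldl (fun a d => a * B + d) a < (a + 1) * B ^ l.length := by
  induction l generalizing a with
  | nil => simp
  | cons x r ih =>
    have hx : x < B := hl x (by simp)
    have h1 := ih (fun d hd => hl d (by simp [hd])) (a * B + x)
    have h2 : (a * B + x + 1) * B ^ r.length ≤ (a + 1) * B ^ (r.length + 1) := by
      have hle : a * B + x + 1 ≤ (a + 1) * B := by
        have : (a + 1) * B = a * B + B := by ring
        omega
      calc (a * B + x + 1) * B ^ r.length ≤ ((a + 1) * B) * B ^ r.length :=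
            Nat.mul_le_mul_right _ hle
        _ = (a + 1) * B ^ (r.length + 1) := by ring
    simpa using lt_of_lt_of_le h1 h2

theorem valN_lt (B : Nat) (l : List Nat) (hl : ∀ d ∈ l, d < B) :
    valN B l < B ^ l.length := by
  simpa [valN] using foldl_val_lt B l hl 0

theorem foldl_shift (B : Nat) (v : List Nat) (a : Nat) :
    v.foldl (fun a d => a * B + d) a = a * B ^ v.length + valN B v := by
  induction v generalizing a with
  | nil => simp [valN]
  | cons x r ih =>
    simp only [List.foldl_cons, List.length_cons]
    rw [ih (a * B + x)]
    have hx : valN B (x :: r) = x * B ^ r.length + valN B r := by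
      simp only [valN, List.foldl_cons]
      simpa using ih x
    rw [hx]; ring

theorem valN_cons (B x : Nat) (r : List Nat) :
    valN B (x :: r) = x * B ^ r.length + valN B r := by
  simp only [valN, List.foldl_cons]
  simpa using foldl_shift B r x

-- ---- parseBase? computes valN on valid digit strings ----

theorem parse_foldl (b : Int) (hb : 0 ≤ b) (l : List Char)
    (hl : ∀ c ∈ l, '0' ≤ c ∧ c ≤ '9' ∧ (dv c : Int) < b) (a : Nat) :
    l.foldl (fun acc c =>
      match acc with
      | some a => if ('0' ≤ c ∧ c ≤ '9') ∧ (dv c : Int) < b then some (a * b + (dv c : Int)) else none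
      | none => none) (some (a : Int))
    = some (((l.map dv).foldl (fun a d => a * b.toNat + d) a : Nat) : Int) := by
  induction l generalizing a with
  | nil => simp
  | cons c r ih =>
    have hc := hl c (by simp)
    simp only [List.foldl_cons, List.map_cons]
    rw [if_pos ⟨⟨hc.1, hc.2.1⟩, hc.2.2⟩]
    have hcast : ((a : Int)) * b + (dv c : Int) = ((a * b.toNat + dv c : Nat) : Int) := by
      push_cast
      rw [Int.toNat_of_nonneg hb]
    rw [hcast]
    exact ih (fun c hc => hl c (by simp [hc])) _

theorem parse_eq (b : Int) (hb2 : 2 ≤ b) (hb36 : b ≤ 36) (s : List Char) (hs : s ≠ [])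
    (hl : ∀ c ∈ s, '0' ≤ c ∧ c ≤ '9' ∧ (dv c : Int) < b) :
    parseBase? s b = some ((valN b.toNat (s.map dv) : Nat) : Int) := by
  unfold parseBase?
  rw [if_pos ⟨hb2, hb36⟩, if_neg hs]
  have h := parse_foldl b (by omega) s hl 0
  simp only [Nat.cast_zero] at h
  rw [h]
  simp [valN, List.foldl_map]

-- ---- sorting facts ----

theorem sortAsc_perm (s : List Char) : (sortAsc s).Perm s :=
  PySem.List.sorted_perm s _ false

theorem sortDesc_perm (s : List Char) : (sortDesc s).Perm s :=
  PySem.List.sorted_perm s _ true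

theorem sortAsc_pairwise (s : List Char) : (sortAsc s).Pairwise (· ≤ ·) :=
  PySem.List.sorted_pairwise s (fun c => c)

theorem sortDesc_eq_reverse (s : List Char) : sortDesc s = (sortAsc s).reverse := by
  have h1 : (sortDesc s).reverse = sortAsc s := by
    apply PySem.List.eq_of_perm_of_pairwise_le
    · exact ((List.reverse_perm _).trans (sortDesc_perm s)).trans (sortAsc_perm s).symm
    · rw [List.pairwise_reverse]
      exact PySem.List.sorted_pairwise_rev s (fun c => c)
    · exact sortAsc_pairwise s
  rw [← h1, List.reverse_reverse]

-- ---- the descending arrangement is the largest: valN l ≤ valN l.reverse for sorted l ----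

def repB (B : Nat) : Nat → Nat
  | 0 => 0
  | k+1 => B ^ k + repB B k

theorem pow_eq_repB (B : Nat) (hB : 1 ≤ B) (k : Nat) :
    B ^ k = (B - 1) * repB B k + 1 := by
  induction k with
  | zero => simp [repB]
  | succ k ih =>
    have hb : B - 1 + 1 = B := by omega
    calc B ^ (k + 1) = B ^ k * B := by ring
      _ = B ^ k * (B - 1 + 1) := by rw [hb]
      _ = B ^ k * (B - 1) + B ^ k := by ring
      _ = B ^ k * (B - 1) + ((B - 1) * repB B k + 1) := by rw [← ih]
      _ = (B - 1) * (B ^ k + repB B k) + 1 := by ring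
      _ = (B - 1) * repB B (k + 1) + 1 := by rw [repB]

theorem valN_ge_head (B x : Nat) (l : List Nat) (h : ∀ y ∈ l, x ≤ y) :
    x * repB B l.length ≤ valN B l := by
  induction l with
  | nil => simp [repB, valN]
  | cons y r ih =>
    rw [valN_cons, List.length_cons, repB]
    have h1 := ih (fun y hy => h y (by simp [hy]))
    have h2 : x * B ^ r.length ≤ y * B ^ r.length :=
      Nat.mul_le_mul_right _ (h y (by simp))
    calc x * (B ^ r.length + repB B r.length) = x * B ^ r.length + x * repB B r.length := by ring
      _ ≤ y * B ^ r.length + valN B r := by omega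

theorem valN_reverse_ge (B : Nat) (hB : 2 ≤ B) (l : List Nat) (hsort : l.Pairwise (· ≤ ·)) :
    valN B l ≤ valN B l.reverse := by
  induction l with
  | nil => simp
  | cons x r ih =>
    have hxr : ∀ y ∈ r, x ≤ y := (List.pairwise_cons.1 hsort).1
    have hr := ih (List.pairwise_cons.1 hsort).2
    rw [valN_cons, List.reverse_cons]
    have happ : valN B (r.reverse ++ [x]) = valN B r.reverse * B + x := by
      have := foldl_shift B [x] (0)
      simp only [valN, List.foldl_append]
      rw [foldl_shift B [x] (r.reverse.foldl (fun a d => a * B + d) 0)]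
      simp [valN]
    rw [happ]
    have h1 : x * repB B r.length ≤ valN B r := valN_ge_head B x r hxr
    have h3 : B ^ r.length = (B - 1) * repB B r.length + 1 := pow_eq_repB B (by omega) r.length
    have h4 : (B - 1) * (x * repB B r.length) ≤ (B - 1) * valN B r :=
      Nat.mul_le_mul_left _ h1
    have h5 : valN B r ≤ valN B r.reverse := hr
    have hb : B - 1 + 1 = B := by omega
    calc x * B ^ r.length + valN B r
        = x * ((B - 1) * repB B r.length + 1) + valN B r := by rw [h3]
      _ = (B - 1) * (x * repB B r.length) + x + valN B r := by ring
      _ ≤ (B - 1) * valN B r + x + valN B r := by omega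
      _ = (B - 1 + 1) * valN B r + x := by ring
      _ = B * valN B r + x := by rw [hb]
      _ ≤ B * valN B r.reverse + x := by
          have := Nat.mul_le_mul_left B h5
          omega
      _ = valN B r.reverse * B + x := by ring


-- ---- characters ----

theorem char_le_iff (a b : Char) : a ≤ b ↔ a.toNat ≤ b.toNat := by
  rw [Char.le_def, UInt32.le_iff_toNat_le]
  rfl

theorem char_eq_of_toNat (a b : Char) (h : a.toNat = b.toNat) : a = b :=
  Char.ext (UInt32.toNat.inj h)

set_option maxRecDepth 4096 in
theorem digitChar_spec (d : Nat) (hd : d < 10) :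
    '0' ≤ Nat.digitChar d ∧ Nat.digitChar d ≤ '9' ∧ dv (Nat.digitChar d) = d := by
  interval_cases d
  · exact ⟨by decide, by decide, by decide⟩
  · exact ⟨by decide, by decide, by decide⟩
  · exact ⟨by decide, by decide, by decide⟩
  · exact ⟨by decide, by decide, by decide⟩
  · exact ⟨by decide, by decide, by decide⟩
  · exact ⟨by decide, by decide, by decide⟩
  · exact ⟨by decide, by decide, by decide⟩
  · exact ⟨by decide, by decide, by decide⟩
  · exact ⟨by decide, by decide, by decide⟩
  · exact ⟨by decide, by decide, by decide⟩

theorem dv_lt_ten (c : Char) (h0 : '0' ≤ c) (h9 : c ≤ '9') : dv c < 10 := by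
  rw [char_le_iff] at h9
  have : ('9' : Char).toNat = 57 := by decide
  unfold dv
  omega

theorem dv_inj (c c' : Char) (h0 : '0' ≤ c) (h0' : '0' ≤ c') (h : dv c = dv c') : c = c' := by
  rw [char_le_iff] at h0 h0'
  have h48 : ('0' : Char).toNat = 48 := by decide
  apply char_eq_of_toNat
  unfold dv at h
  omega

theorem dv_mono (c c' : Char) (h : c ≤ c') : dv c ≤ dv c' := by
  rw [char_le_iff] at h
  unfold dv
  omega

theorem tableC_get (i : Int) (h0 : 0 ≤ i) (h : i < 10) :
    PySem.List.pyGet? tableC i = some (Nat.digitChar i.toNat) := by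
  lift i to Nat using h0 with m
  have hm : m < 10 := by exact_mod_cast h
  interval_cases m <;> decide

-- ---- canon / toBaseA / digitsB ----

theorem canon_spec (B : Nat) (hB : 2 ≤ B) (hB10 : B ≤ 10) :
    ∀ m, canon B m ≠ [] ∧ ∀ c ∈ canon B m, '0' ≤ c ∧ c ≤ '9' ∧ (dv c : Int) < (B : Int) := by
  intro m
  induction m using Nat.strong_induction_on with
  | _ m ih =>
    rw [canon]
    by_cases hlt : m < B
    · rw [if_pos hlt]
      have hd := digitChar_spec m (by omega)
      refine ⟨by simp, ?_⟩
      intro c hc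
      simp at hc
      subst hc
      exact ⟨hd.1, hd.2.1, by rw [hd.2.2]; exact_mod_cast hlt⟩
    · rw [if_neg hlt, dif_pos hB]
      have hrec := ih (m / B) (Nat.div_lt_self (by omega) (by omega))
      have hd := digitChar_spec (m % B) (by have := Nat.mod_lt m (show 0 < B by omega); omega)
      refine ⟨by simp, ?_⟩
      intro c hc
      rw [List.mem_append] at hc
      rcases hc with hc | hc
      · exact hrec.2 c hc
      · simp at hc
        subst hc
        refine ⟨hd.1, hd.2.1, ?_⟩
        rw [hd.2.2]
        have := Nat.mod_lt m (show 0 < B by omega)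
        exact_mod_cast this

theorem canon_len (B : Nat) (hB : 2 ≤ B) :
    ∀ k m, m < B ^ k → 1 ≤ k → (canon B m).length ≤ k := by
  intro k
  induction k with
  | zero => omega
  | succ k ih =>
    intro m hm _
    rw [canon]
    by_cases hlt : m < B
    · rw [if_pos hlt]; simp
    · rw [if_neg hlt, dif_pos hB]
      have hk : 1 ≤ k := by
        by_contra hk0
        have : k = 0 := by omega
        subst this
        simp at hm
        omega
      have hdiv : m / B < B ^ k := by
        rw [Nat.div_lt_iff_lt_mul (by omega)]
        calc m < B ^ (k+1) := hm
          _ = B ^ k * B := by ring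
      have := ih (m / B) hdiv hk
      simp only [List.length_append, List.length_cons, List.length_nil]
      omega

theorem toBaseA_eq (b : Int) (hb : 2 ≤ b) (hb10 : b ≤ 10) :
    ∀ m fuel, m < fuel → toBaseA b fuel (m : Nat) = some (canon b.toNat m) := by
  intro m
  induction m using Nat.strong_induction_on with
  | _ m ih =>
    intro fuel hfuel
    match fuel with
    | f + 1 =>
      rw [toBaseA]
      have hbn : ((b.toNat : Int)) = b := Int.toNat_of_nonneg (by omega)
      by_cases hlt : (m : Int) < b
      · rw [if_pos hlt]
        rw [tableC_get (m : Int) (by omega) (by omega)]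
        rw [canon, if_pos (by exact_mod_cast hbn ▸ hlt)]
        simp
      · rw [if_neg hlt]
        have hmB : b.toNat ≤ m := by
          rw [← hbn] at hlt
          exact_mod_cast not_lt.1 hlt
        have hdiveq : PySem.Int.floordiv (m : Int) b = ((m / b.toNat : Nat) : Int) := by
          rw [← hbn]
          exact PySem.Int.floordiv_natCast m b.toNat
        have hmodeq : PySem.Int.mod (m : Int) b = ((m % b.toNat : Nat) : Int) := by
          rw [← hbn]
          exact PySem.Int.mod_natCast m b.toNat
        have hmodlt : m % b.toNat < 10 := by
          have := Nat.mod_lt m (show 0 < b.toNat by omega)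
          omega
        have hget : PySem.List.pyGet? tableC ((m % b.toNat : Nat) : Int)
            = some (Nat.digitChar (m % b.toNat)) := by
          rw [tableC_get _ (by omega) (by exact_mod_cast hmodlt), Int.toNat_natCast]
        have hdivlt : m / b.toNat < m := Nat.div_lt_self (by omega) (by omega)
        rw [hdiveq, hmodeq, ih (m / b.toNat) hdivlt f (by omega), hget]
        show some (canon b.toNat (m / b.toNat) ++ [Nat.digitChar (m % b.toNat)])
          = some (canon b.toNat m)
        conv_rhs => rw [canon, if_neg (by omega : ¬ m < b.toNat), dif_pos (by omega : 2 ≤ b.toNat)]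

def revD (B : Nat) (m : Nat) : List Char :=
  if h : m = 0 ∨ B < 2 then [] else Nat.digitChar (m % B) :: revD B (m / B)
termination_by m
decreasing_by
  exact Nat.div_lt_self (by omega) (by omega)

theorem digitsB_eq (b : Int) (hb : 2 ≤ b) (hb10 : b ≤ 10) :
    ∀ m fuel acc, m < fuel → digitsB b fuel (m : Nat) acc = some (acc ++ revD b.toNat m) := by
  intro m
  induction m using Nat.strong_induction_on with
  | _ m ih =>
    intro fuel acc hfuel
    match fuel with
    | f + 1 =>
      rw [digitsB]
      have hbn : ((b.toNat : Int)) = b := Int.toNat_of_nonneg (by omega)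
      by_cases hm0 : m = 0
      · subst hm0
        rw [if_neg (by simp)]
        rw [revD]
        simp
      · rw [if_pos (by exact_mod_cast hm0)]
        have hmodeq : PySem.Int.mod (m : Int) b = ((m % b.toNat : Nat) : Int) := by
          rw [← hbn]
          exact PySem.Int.mod_natCast m b.toNat
        have hdiveq : PySem.Int.floordiv (m : Int) b = ((m / b.toNat : Nat) : Int) := by
          rw [← hbn]
          exact PySem.Int.floordiv_natCast m b.toNat
        have hmodlt : m % b.toNat < 10 := by
          have := Nat.mod_lt m (show 0 < b.toNat by omega)
          omega
        have hget : PySem.List.pyGet? tableC ((m % b.toNat : Nat) : Int)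
            = some (Nat.digitChar (m % b.toNat)) := by
          rw [tableC_get _ (by omega) (by exact_mod_cast hmodlt), Int.toNat_natCast]
        have hdivlt : m / b.toNat < m := Nat.div_lt_self (by omega) (by omega)
        rw [hmodeq, hdiveq, hget]
        show digitsB b f ((m / b.toNat : Nat) : Int) (acc ++ [Nat.digitChar (m % b.toNat)])
          = some (acc ++ revD b.toNat m)
        rw [ih (m / b.toNat) hdivlt f _ (by omega)]
        conv_rhs => rw [revD, dif_neg (by omega : ¬ (m = 0 ∨ b.toNat < 2))]
        simp

theorem revD_reverse (B : Nat) (hB : 2 ≤ B) :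
    ∀ m, (revD B m).reverse = if m = 0 then [] else canon B m := by
  intro m
  induction m using Nat.strong_induction_on with
  | _ m ih =>
    by_cases hm0 : m = 0
    · subst hm0
      rw [revD]
      simp
    · rw [if_neg hm0, revD, dif_neg (by omega)]
      rw [List.reverse_cons]
      by_cases hlt : m < B
      · have hdiv0 : m / B = 0 := Nat.div_eq_of_lt hlt
        have hmod : m % B = m := Nat.mod_eq_of_lt hlt
        rw [hdiv0, hmod]
        rw [ih 0 (by omega), if_pos rfl]
        rw [canon, if_pos hlt]
        simp
      · have hdivlt : m / B < m := Nat.div_lt_self (by omega) (by omega)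
        have hdivne : m / B ≠ 0 := by
          have : B ≤ m := by omega
          have := Nat.one_le_div_iff (show 0 < B by omega) |>.2 this
          omega
        rw [ih (m / B) hdivlt, if_neg hdivne]
        conv_rhs => rw [canon, if_neg hlt, dif_pos hB]


-- ---- the step both programs compute ----

theorem sorted_mem_iff (s : List Char) (c : Char) :
    (c ∈ sortDesc s ↔ c ∈ s) ∧ (c ∈ sortAsc s ↔ c ∈ s) :=
  ⟨(sortDesc_perm s).mem_iff, (sortAsc_perm s).mem_iff⟩

theorem Nx_lt (b : Int) (hb2 : 2 ≤ b) (s : List Char) (hv : validS b s) :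
    NxV b.toNat s < b.toNat ^ s.length := by
  have hlen : ((sortDesc s).map dv).length = s.length := by
    simp [sortDesc, PySem.List.length_sorted]
  rw [NxV, ← hlen]
  apply valN_lt
  intro d hd
  rw [List.mem_map] at hd
  obtain ⟨c, hc, rfl⟩ := hd
  have hcs := (sorted_mem_iff s c).1.1 hc
  have := (hv.2 c hcs).2.2
  omega

theorem Ny_le_Nx (b : Int) (hb2 : 2 ≤ b) (s : List Char) :
    NyV b.toNat s ≤ NxV b.toNat s := by
  rw [NxV, NyV, sortDesc_eq_reverse, List.map_reverse]
  apply valN_reverse_ge _ (by omega)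
  exact (sortAsc_pairwise s).map _ (fun a b h => dv_mono a b h)

theorem zfill_digits (cs : List Char) (w : Int) (hcs : cs ≠ []) (hd : ∀ c ∈ cs, '0' ≤ c) :
    PySem.Chars.zfill cs w = List.replicate (w.toNat - cs.length) '0' ++ cs := by
  unfold PySem.Chars.zfill
  by_cases hw : w ≤ (cs.length : Int)
  · rw [if_pos hw]
    have : w.toNat - cs.length = 0 := by omega
    rw [this]
    simp
  · rw [if_neg hw]
    match cs, hcs with
    | c :: rest, _ =>
      have hc0 : '0' ≤ c := hd c (by simp)
      have hne : ¬ (c = '+' ∨ c = '-') := by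
        rintro (rfl | rfl) <;> revert hc0 <;> decide
      dsimp only
      rw [if_neg hne]

theorem canon_ne_len (b : Int) (hb2 : 2 ≤ b) (hb10 : b ≤ 10) (s : List Char) (hv : validS b s) :
    canon b.toNat (NxV b.toNat s - NyV b.toNat s) ≠ [] ∧
    (∀ c ∈ canon b.toNat (NxV b.toNat s - NyV b.toNat s), '0' ≤ c ∧ c ≤ '9' ∧ (dv c : Int) < b) ∧
    (canon b.toNat (NxV b.toNat s - NyV b.toNat s)).length ≤ s.length := by
  have hbn : ((b.toNat : Int)) = b := Int.toNat_of_nonneg (by omega)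
  have hB2 : 2 ≤ b.toNat := by omega
  have hB10 : b.toNat ≤ 10 := by omega
  have hspec := canon_spec b.toNat hB2 hB10 (NxV b.toNat s - NyV b.toNat s)
  refine ⟨hspec.1, ?_, ?_⟩
  · intro c hc
    have := hspec.2 c hc
    exact ⟨this.1, this.2.1, by rw [← hbn]; exact this.2.2⟩
  · apply canon_len b.toNat hB2
    · calc NxV b.toNat s - NyV b.toNat s ≤ NxV b.toNat s := Nat.sub_le _ _
        _ < b.toNat ^ s.length := Nx_lt b hb2 s hv
    · have := List.length_pos_of_ne_nil hv.1
      omega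

theorem fstep_spec (b : Int) (hb2 : 2 ≤ b) (hb10 : b ≤ 10) (s : List Char) (hv : validS b s) :
    validS b (fstep b.toNat s) ∧ (fstep b.toNat s).length = s.length := by
  obtain ⟨hne, hdig, hlen⟩ := canon_ne_len b hb2 hb10 s hv
  have hlenz : (fstep b.toNat s).length = s.length := by
    rw [fstep, PySem.Chars.length_zfill]
    simp
    omega
  refine ⟨⟨?_, ?_⟩, hlenz⟩
  · intro h
    have := congrArg List.length h
    rw [hlenz] at this
    simp at this
    exact hv.1 this
  · rw [fstep, zfill_digits _ _ hne (fun c hc => (hdig c hc).1)]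
    intro c hc
    rw [List.mem_append] at hc
    rcases hc with hc | hc
    · rw [List.mem_replicate] at hc
      rw [hc.2]
      refine ⟨by decide, by decide, ?_⟩
      show (dv '0' : Int) < b
      have : dv '0' = 0 := by decide
      rw [this]
      exact_mod_cast by omega
    · exact hdig c hc

theorem parse_desc (b : Int) (hb2 : 2 ≤ b) (hb10 : b ≤ 10) (s : List Char) (hv : validS b s) :
    parseBase? (sortDesc s) b = some ((NxV b.toNat s : Nat) : Int) := by
  apply parse_eq b hb2 (by omega)
  · intro h
    have := congrArg List.length h
    simp [sortDesc, PySem.List.length_sorted] at this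
    exact hv.1 this
  · intro c hc
    exact hv.2 c ((sorted_mem_iff s c).1.1 hc)

theorem parse_asc (b : Int) (hb2 : 2 ≤ b) (hb10 : b ≤ 10) (s : List Char) (hv : validS b s) :
    parseBase? (sortAsc s) b = some ((NyV b.toNat s : Nat) : Int) := by
  apply parse_eq b hb2 (by omega)
  · intro h
    have := congrArg List.length h
    simp [sortAsc, PySem.List.length_sorted] at this
    exact hv.1 this
  · intro c hc
    exact hv.2 c ((sorted_mem_iff s c).2.1 hc)

theorem canon_zero (B : Nat) (hB : 2 ≤ B) : canon B 0 = ['0'] := by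
  rw [canon, if_pos (by omega)]
  rfl

theorem sub_toNat (Nx Ny : Nat) (h : Ny ≤ Nx) :
    ((Nx : Int) - (Ny : Int) = ((Nx - Ny : Nat) : Int)) ∧ ((Nx : Int) - (Ny : Int)).toNat = Nx - Ny := by
  constructor <;> omega

theorem stepB_eq (b : Int) (hb2 : 2 ≤ b) (hb10 : b ≤ 10) (s : List Char) (hv : validS b s) :
    stepB b s = some (fstep b.toNat s) := by
  have hle := Ny_le_Nx b hb2 s
  obtain ⟨hsub, htn⟩ := sub_toNat _ _ hle
  unfold stepB
  rw [parse_desc b hb2 hb10 s hv, parse_asc b hb2 hb10 s hv]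
  show (digitsB b ((((NxV b.toNat s : Nat) : Int) - ((NyV b.toNat s : Nat) : Int)).toNat + 1)
      (((NxV b.toNat s : Nat) : Int) - ((NyV b.toNat s : Nat) : Int)) []).map _ = _
  rw [hsub, Int.toNat_natCast]
  rw [digitsB_eq b hb2 hb10 (NxV b.toNat s - NyV b.toNat s) _ [] (by omega)]
  rw [Option.map_some]
  congr 1
  simp only [List.nil_append]
  rw [revD_reverse b.toNat (by omega)]
  by_cases hm : NxV b.toNat s - NyV b.toNat s = 0
  · rw [if_pos hm, if_pos rfl, fstep, hm, canon_zero b.toNat (by omega)]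
  · rw [if_neg hm, if_neg (canon_spec b.toNat (by omega) (by omega) _).1, fstep]

-- ---- orbits ----

theorem orb_succ (B : Nat) (s0 : List Char) (i : Nat) :
    orbS B s0 (i+1) = fstep B (orbS B s0 i) := Function.iterate_succ_apply' _ _ _

theorem orb_add (B : Nat) (s0 : List Char) (a k : Nat) :
    orbS B s0 (a + k) = (fstep B)^[k] (orbS B s0 a) := by
  rw [orbS, Nat.add_comm, Function.iterate_add_apply]
  rfl

theorem valid_orb (b : Int) (hb2 : 2 ≤ b) (hb10 : b ≤ 10) (s0 : List Char) (hv : validS b s0) :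
    ∀ i, validS b (orbS b.toNat s0 i) ∧ (orbS b.toNat s0 i).length = s0.length := by
  intro i
  induction i with
  | zero => exact ⟨hv, rfl⟩
  | succ i ih =>
    rw [orb_succ]
    have := fstep_spec b hb2 hb10 _ ih.1
    exact ⟨this.1, by rw [this.2, ih.2]⟩


-- ---- combinatorics of the eventually periodic orbit ----
-- throughout: jst < ist is the first repeated pair (orbS jst = orbS ist, no repeat before ist),
-- and p := ist - jst is the cycle length.

theorem op_per (B : Nat) (s0 : List Char) (ist jst : Nat) (hji : jst < ist)
    (heq : orbS B s0 jst = orbS B s0 ist) :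
    ∀ a, jst ≤ a → orbS B s0 (a + (ist - jst)) = orbS B s0 a := by
  intro a ha
  have h1 : a + (ist - jst) = jst + (ist - jst) + (a - jst) := by omega
  rw [h1, orb_add]
  have h2 : jst + (ist - jst) = ist := by omega
  rw [h2, ← heq, ← orb_add]
  congr 1
  omega

theorem op_mul (B : Nat) (s0 : List Char) (ist jst : Nat) (hji : jst < ist)
    (heq : orbS B s0 jst = orbS B s0 ist) :
    ∀ a c, jst ≤ a → orbS B s0 (a + c * (ist - jst)) = orbS B s0 a := by
  intro a c ha
  induction c with
  | zero => simp
  | succ c ih =>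
    have h : a + (c + 1) * (ist - jst) = (a + c * (ist - jst)) + (ist - jst) := by ring
    rw [h, op_per B s0 ist jst hji heq _ (by omega), ih]

theorem op_nodup (B : Nat) (s0 : List Char) (ist : Nat)
    (hmin : ∀ k, k < ist → ¬ RepP B s0 k) :
    ∀ x y, x < y → y < ist → orbS B s0 x ≠ orbS B s0 y := by
  intro x y hxy hy h
  exact hmin y hy ⟨x, hxy, h⟩

theorem op_dvd (B : Nat) (s0 : List Char) (ist jst : Nat) (hji : jst < ist)
    (heq : orbS B s0 jst = orbS B s0 ist) (hmin : ∀ k, k < ist → ¬ RepP B s0 k) :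
    ∀ a d, jst ≤ a → orbS B s0 (a + d) = orbS B s0 a → (ist - jst) ∣ d := by
  intro a d ha h
  have hp : 0 < ist - jst := by omega
  have hfwd : ∀ e, orbS B s0 (a + e + d) = orbS B s0 (a + e) := by
    intro e
    have h1 : a + e + d = (a + d) + e := by ring
    rw [h1, orb_add, h, ← orb_add]
  have hma : a ≤ a * (ist - jst) := Nat.le_mul_of_pos_right a hp
  have hmd : d % (ist - jst) + d / (ist - jst) * (ist - jst) = d := Nat.mod_add_div' d _
  have hkey : orbS B s0 (jst + d % (ist - jst)) = orbS B s0 jst := by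
    have e1 : jst + d % (ist - jst) + (a + d / (ist - jst)) * (ist - jst)
        = (a + (jst + a * (ist - jst) - a)) + d := by
      have hx : (a + d / (ist - jst)) * (ist - jst)
          = a * (ist - jst) + d / (ist - jst) * (ist - jst) := by ring
      omega
    have e2 : a + (jst + a * (ist - jst) - a) = jst + a * (ist - jst) := by omega
    calc orbS B s0 (jst + d % (ist - jst))
        = orbS B s0 (jst + d % (ist - jst) + (a + d / (ist - jst)) * (ist - jst)) :=
          (op_mul B s0 ist jst hji heq _ _ (by omega)).symm
      _ = orbS B s0 (a + (jst + a * (ist - jst) - a)) := by rw [e1]; exact hfwd _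
      _ = orbS B s0 (jst + a * (ist - jst)) := by rw [e2]
      _ = orbS B s0 jst := op_mul B s0 ist jst hji heq _ _ (by omega)
  by_cases hr : d % (ist - jst) = 0
  · exact Nat.dvd_of_mod_eq_zero hr
  · exfalso
    have hlt : d % (ist - jst) < ist - jst := Nat.mod_lt _ hp
    exact hmin (jst + d % (ist - jst)) (by omega) ⟨jst, by omega, hkey.symm⟩

theorem op_lower (B : Nat) (s0 : List Char) (ist jst : Nat) (hji : jst < ist)
    (heq : orbS B s0 jst = orbS B s0 ist) (hmin : ∀ k, k < ist → ¬ RepP B s0 k) :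
    ∀ x y, x < y → orbS B s0 x = orbS B s0 y → jst ≤ x := by
  intro x y hxy h
  by_contra hx
  have hyist : ist ≤ y := by
    by_contra hy
    exact hmin y (by omega) ⟨x, hxy, h⟩
  have hp : 0 < ist - jst := by omega
  have hmd : (y - jst) % (ist - jst) + (y - jst) / (ist - jst) * (ist - jst) = y - jst :=
    Nat.mod_add_div' _ _
  have hwin : orbS B s0 y = orbS B s0 (jst + (y - jst) % (ist - jst)) := by
    have e1 : y = (jst + (y - jst) % (ist - jst)) + (y - jst) / (ist - jst) * (ist - jst) := by
      generalize hA : (y - jst) % (ist - jst) = A at hmd ⊢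
      generalize hB : (y - jst) / (ist - jst) * (ist - jst) = Bq at hmd ⊢
      omega
    conv_lhs => rw [e1]
    exact op_mul B s0 ist jst hji heq (jst + (y - jst) % (ist - jst))
      ((y - jst) / (ist - jst)) (by omega)
  have hlt : (y - jst) % (ist - jst) < ist - jst := Nat.mod_lt _ hp
  exact hmin (jst + (y - jst) % (ist - jst)) (by omega)
    ⟨x, by omega, h.trans hwin⟩


-- ---- correctness of B's two loops ----

theorem floyd2_ok (b : Int) (hb2 : 2 ≤ b) (hb10 : b ≤ 10) (s0 : List Char) (hv : validS b s0)
    (ist jst : Nat) (hji : jst < ist)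
    (heq : orbS b.toNat s0 jst = orbS b.toNat s0 ist)
    (hmin : ∀ k, k < ist → ¬ RepP b.toNat s0 k)
    (s : Nat) (hs : jst ≤ s) :
    ∀ fuel c cnt, 1 ≤ c → c ≤ ist - jst → ist - jst - c < fuel →
      floyd2 b fuel (orbS b.toNat s0 (s + c)) (orbS b.toNat s0 s) cnt
        = cnt + ((ist - jst - c : Nat) : Int) := by
  intro fuel
  induction fuel with
  | zero => intro c cnt h1 h2 h3; omega
  | succ f ih =>
    intro c cnt h1 h2 h3
    rw [floyd2]
    by_cases hcp : c = ist - jst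
    · have hEq : orbS b.toNat s0 (s + c) = orbS b.toNat s0 s := by
        rw [hcp]
        exact op_per b.toNat s0 ist jst hji heq s hs
      rw [hEq, if_neg (by simp)]
      rw [hcp]
      simp
    · have hne : orbS b.toNat s0 (s + c) ≠ orbS b.toNat s0 s := by
        intro hEq
        have hdvd := op_dvd b.toNat s0 ist jst hji heq hmin s c hs hEq
        have := Nat.le_of_dvd (by omega) hdvd
        omega
      rw [if_pos hne]
      rw [stepB_eq b hb2 hb10 _ (valid_orb b hb2 hb10 s0 hv (s + c)).1]
      have hstep : fstep b.toNat (orbS b.toNat s0 (s + c)) = orbS b.toNat s0 (s + (c + 1)) := by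
        rw [show s + (c + 1) = (s + c) + 1 from by ring, orb_succ]
      rw [hstep]
      show floyd2 b f (orbS b.toNat s0 (s + (c + 1))) (orbS b.toNat s0 s) (cnt + 1)
        = cnt + ((ist - jst - c : Nat) : Int)
      rw [ih (c + 1) (cnt + 1) (by omega) (by omega) (by omega)]
      omega

theorem floyd1_ok (b : Int) (hb2 : 2 ≤ b) (hb10 : b ≤ 10) (s0 : List Char) (hv : validS b s0) :
    ∀ fuel k, (∃ d, d < fuel ∧ orbS b.toNat s0 (k+1+d) = orbS b.toNat s0 (2*(k+1+d))) →
      ∃ s, 1 ≤ s ∧ orbS b.toNat s0 s = orbS b.toNat s0 (2*s) ∧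
        floyd1 b fuel (orbS b.toNat s0 (k+1)) (orbS b.toNat s0 (2*k+2))
          = some (orbS b.toNat s0 s) := by
  intro fuel
  induction fuel with
  | zero =>
    rintro k ⟨d, hd, -⟩
    omega
  | succ f ih =>
    rintro k ⟨d, hd, hmeet⟩
    rw [floyd1]
    by_cases hEq : orbS b.toNat s0 (k+1) = orbS b.toNat s0 (2*k+2)
    · refine ⟨k+1, by omega, ?_, by rw [if_pos hEq]⟩
      rw [show 2*(k+1) = 2*k+2 from by ring]
      exact hEq
    · rw [if_neg hEq]
      have hd0 : d ≠ 0 := by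
        intro h0
        subst h0
        rw [show 2*(k+1+0) = 2*k+2 from by ring, show k+1+0 = k+1 from by ring] at hmeet
        exact hEq hmeet
      rw [stepB_eq b hb2 hb10 _ (valid_orb b hb2 hb10 s0 hv (k+1)).1]
      rw [stepB_eq b hb2 hb10 _ (valid_orb b hb2 hb10 s0 hv (2*k+2)).1]
      rw [show fstep b.toNat (orbS b.toNat s0 (k+1)) = orbS b.toNat s0 (k+1+1)
        from (orb_succ _ _ _).symm]
      rw [show fstep b.toNat (orbS b.toNat s0 (2*k+2)) = orbS b.toNat s0 (2*k+2+1)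
        from (orb_succ _ _ _).symm]
      dsimp only [Option.bind]
      rw [stepB_eq b hb2 hb10 _ (valid_orb b hb2 hb10 s0 hv (2*k+2+1)).1]
      rw [show fstep b.toNat (orbS b.toNat s0 (2*k+2+1)) = orbS b.toNat s0 (2*k+2+1+1)
        from (orb_succ _ _ _).symm]
      show ∃ s, 1 ≤ s ∧ orbS b.toNat s0 s = orbS b.toNat s0 (2*s) ∧
        floyd1 b f (orbS b.toNat s0 (k+1+1)) (orbS b.toNat s0 (2*k+2+1+1))
          = some (orbS b.toNat s0 s)
      rw [show (2*k+2+1+1 : Nat) = 2*(k+1)+2 from by ring]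
      exact ih (k+1) ⟨d - 1, by omega,
        by rw [show (k+1)+1+(d-1) = k+1+d from by omega]; exact hmeet⟩

-- ---- correctness of A's loop ----

theorem loopA_ok (b : Int) (hb2 : 2 ≤ b) (hb10 : b ≤ 10) (s0 : List Char) (hv : validS b s0)
    (ist jst : Nat) (hji : jst < ist)
    (heq : orbS b.toNat s0 jst = orbS b.toNat s0 ist)
    (hmin : ∀ k, k < ist → ¬ RepP b.toNat s0 k) :
    ∀ fuel i hist, i < ist → ist - i ≤ fuel →
      (∀ j, j ≤ i → hist.get? (orbS b.toNat s0 j) = some (j : Int)) →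
      (∀ s, hist.get? s ≠ none → ∃ j, j ≤ i ∧ s = orbS b.toNat s0 j) →
      loopA b fuel (orbS b.toNat s0 i) hist (i : Int) = (ist : Int) - (jst : Int) := by
  intro fuel
  induction fuel with
  | zero => intro i hist hi hfuel _ _; omega
  | succ f ih =>
    intro i hist hi hfuel H1 H2
    rw [loopA]
    obtain ⟨hvi, hleni⟩ := valid_orb b hb2 hb10 s0 hv i
    rw [parse_desc b hb2 hb10 _ hvi, parse_asc b hb2 hb10 _ hvi]
    dsimp only
    have hle := Ny_le_Nx b hb2 (orbS b.toNat s0 i)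
    obtain ⟨hsub, -⟩ := sub_toNat _ _ hle
    rw [hsub, Int.toNat_natCast]
    rw [toBaseA_eq b hb2 hb10 _ _ (by omega)]
    dsimp only
    have hfs : PySem.Chars.zfill
        (canon b.toNat (NxV b.toNat (orbS b.toNat s0 i) - NyV b.toNat (orbS b.toNat s0 i)))
        (((orbS b.toNat s0 i).length : Nat) : Int) = orbS b.toNat s0 (i+1) := by
      rw [orb_succ]
      rfl
    rw [hfs]
    by_cases hii : i + 1 = ist
    · have hg : hist.get? (orbS b.toNat s0 (i+1)) = some ((jst : Nat) : Int) := by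
        rw [hii, ← heq]
        exact H1 jst (by omega)
      rw [hg]
      dsimp only
      omega
    · have hgn : hist.get? (orbS b.toNat s0 (i+1)) = none := by
        cases hq : hist.get? (orbS b.toNat s0 (i+1)) with
        | none => rfl
        | some v =>
          exfalso
          obtain ⟨j, hj, hjeq⟩ := H2 _ (by rw [hq]; simp)
          exact hmin (i+1) (by omega) ⟨j, by omega, hjeq.symm⟩
      rw [hgn]
      dsimp only
      have hcast : ((i : Nat) : Int) + 1 = (((i+1 : Nat)) : Int) := by push_cast; ring
      rw [hcast]
      apply ih (i+1) _ (by omega) (by omega)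
      · intro j hj
        rw [PySem.Dict.get?_insert]
        by_cases hji' : j = i + 1
        · rw [if_pos (by rw [hji'])]
          rw [hji']
        · have hjne : orbS b.toNat s0 j ≠ orbS b.toNat s0 (i+1) :=
            op_nodup b.toNat s0 ist hmin j (i+1) (by omega) (by omega)
          rw [if_neg hjne]
          exact H1 j (by omega)
      · intro s hsne
        rw [PySem.Dict.get?_insert] at hsne
        by_cases hseq : s = orbS b.toNat s0 (i+1)
        · exact ⟨i+1, le_refl _, hseq⟩
        · rw [if_neg hseq] at hsne
          obtain ⟨j, hj, hjeq⟩ := H2 s hsne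
          exact ⟨j, by omega, hjeq⟩


-- ---- a repeat exists: pigeonhole on length-L digit strings ----

theorem valN_inj (B : Nat) :
    ∀ l1 l2 : List Nat, l1.length = l2.length →
    (∀ d ∈ l1, d < B) → (∀ d ∈ l2, d < B) → valN B l1 = valN B l2 → l1 = l2 := by
  intro l1
  induction l1 with
  | nil =>
    intro l2 hlen _ _ _
    cases l2 with
    | nil => rfl
    | cons y t => simp at hlen
  | cons x r ih =>
    intro l2 hlen hb1 hb2 hval
    cases l2 with
    | nil => simp at hlen
    | cons y t =>
      simp only [List.length_cons] at hlen
      have hrt : r.length = t.length := by omega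
      rw [valN_cons, valN_cons, ← hrt] at hval
      have h1 : valN B r < B ^ r.length := valN_lt B r (fun d hd => hb1 d (by simp [hd]))
      have h2 : valN B t < B ^ r.length := by
        rw [hrt]
        exact valN_lt B t (fun d hd => hb2 d (by simp [hd]))
      have hxy : x = y := by
        rcases Nat.lt_trichotomy x y with hlt | heq | hgt
        · exfalso
          have hk : (x + 1) * B ^ r.length ≤ y * B ^ r.length :=
            Nat.mul_le_mul_right _ (by omega)
          have hr : (x + 1) * B ^ r.length = x * B ^ r.length + B ^ r.length := by ring
          omega
        · exact heq
        · exfalso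
          have hk : (y + 1) * B ^ r.length ≤ x * B ^ r.length :=
            Nat.mul_le_mul_right _ (by omega)
          have hr : (y + 1) * B ^ r.length = y * B ^ r.length + B ^ r.length := by ring
          omega
      subst hxy
      have : valN B r = valN B t := by omega
      rw [ih t hrt (fun d hd => hb1 d (by simp [hd])) (fun d hd => hb2 d (by simp [hd])) this]

theorem dvl_inj : ∀ l1 l2 : List Char, (∀ c ∈ l1, '0' ≤ c) → (∀ c ∈ l2, '0' ≤ c) →
    l1.map dv = l2.map dv → l1 = l2 := by
  intro l1
  induction l1 with
  | nil =>
    intro l2 _ _ h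
    cases l2 with
    | nil => rfl
    | cons y t => simp at h
  | cons x r ih =>
    intro l2 h1 h2 h
    cases l2 with
    | nil => simp at h
    | cons y t =>
      simp only [List.map_cons, List.cons.injEq] at h
      rw [dv_inj x y (h1 x (by simp)) (h2 y (by simp)) h.1,
        ih t (fun c hc => h1 c (by simp [hc])) (fun c hc => h2 c (by simp [hc])) h.2]

theorem exists_rep (b : Int) (hb2 : 2 ≤ b) (hb10 : b ≤ 10) (s0 : List Char)
    (hv : validS b s0) :
    ∃ k, k ≤ 10 ^ s0.length ∧ RepP b.toNat s0 k := by
  have hmaps : ∀ i ∈ Finset.range (10 ^ s0.length + 1),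
      (fun i => valN 10 ((orbS b.toNat s0 i).map dv)) i ∈ Finset.range (10 ^ s0.length) := by
    intro i _
    simp only [Finset.mem_range]
    obtain ⟨hvi, hleni⟩ := valid_orb b hb2 hb10 s0 hv i
    have hlen : ((orbS b.toNat s0 i).map dv).length = s0.length := by simp [hleni]
    rw [← hlen]
    apply valN_lt
    intro d hd
    rw [List.mem_map] at hd
    obtain ⟨c, hc, rfl⟩ := hd
    exact dv_lt_ten c (hvi.2 c hc).1 (hvi.2 c hc).2.1
  obtain ⟨x, hx, y, hy, hne, hEq⟩ :=
    Finset.exists_ne_map_eq_of_card_lt_of_maps_to (by simp) hmaps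
  have horb : orbS b.toNat s0 x = orbS b.toNat s0 y := by
    obtain ⟨hvx, hlx⟩ := valid_orb b hb2 hb10 s0 hv x
    obtain ⟨hvy, hly⟩ := valid_orb b hb2 hb10 s0 hv y
    apply dvl_inj _ _ (fun c hc => (hvx.2 c hc).1) (fun c hc => (hvy.2 c hc).1)
    apply valN_inj 10 _ _ (by simp [hlx, hly])
    · intro d hd
      rw [List.mem_map] at hd
      obtain ⟨c, hc, rfl⟩ := hd
      exact dv_lt_ten c (hvx.2 c hc).1 (hvx.2 c hc).2.1
    · intro d hd
      rw [List.mem_map] at hd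
      obtain ⟨c, hc, rfl⟩ := hd
      exact dv_lt_ten c (hvy.2 c hc).1 (hvy.2 c hc).2.1
    · exact hEq
  rw [Finset.mem_range] at hx hy
  rcases Nat.lt_or_ge x y with hxy | hxy
  · exact ⟨y, by omega, x, hxy, horb⟩
  · have hyx : y < x := by omega
    exact ⟨x, by omega, y, hyx, horb.symm⟩

theorem nat_min (P : Nat → Prop) :
    ∀ n, P n → ∃ m, m ≤ n ∧ P m ∧ ∀ k, k < m → ¬ P k := by
  intro n
  induction n using Nat.strong_induction_on with
  | _ n ih =>
    intro hn
    by_cases h : ∃ k, k < n ∧ P k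
    · obtain ⟨k, hk, hPk⟩ := h
      obtain ⟨m, hm, hPm, hmin⟩ := ih k hk hPk
      exact ⟨m, by omega, hPm, hmin⟩
    · exact ⟨n, le_refl _, hn, fun k hk hPk => h ⟨k, hk, hPk⟩⟩

-- ===== VERDICT (by name: the statement is the Claim_ definition above) =====
theorem solution_spec : Claim_equal_solution := by
  intro n b hdom hpre
  unfold Spec_solution
  obtain ⟨hb2, hb10, hne, hdig⟩ := hpre
  have hv : validS b n.toList := by
    refine ⟨hne, ?_⟩
    intro c hc
    have := List.all_eq_true.mp hdig c hc
    simp only [Bool.and_eq_true, decide_eq_true_eq] at this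
    exact ⟨this.1.1, this.1.2, this.2⟩
  obtain ⟨k0, hk0, hrep0⟩ := exists_rep b hb2 hb10 n.toList hv
  obtain ⟨ist, histle, hPist, hmin⟩ := nat_min (RepP b.toNat n.toList) k0 hrep0
  obtain ⟨jst, hji, heq⟩ := hPist
  have histB : ist ≤ 10 ^ n.toList.length := le_trans histle hk0
  have hvalid := valid_orb b hb2 hb10 n.toList hv
  -- A's dictionary loop returns ist - jst
  have hA : solution n b = (ist : Int) - (jst : Int) := by
    have H1 : ∀ j, j ≤ 0 →
        (PySem.Dict.empty.insert n.toList (0:Int)).get? (orbS b.toNat n.toList j)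
          = some ((j : Nat) : Int) := by
      intro j hj
      have hj0 : j = 0 := by omega
      subst hj0
      show (PySem.Dict.empty.insert n.toList (0:Int)).get? n.toList = some ((0 : Nat) : Int)
      rw [PySem.Dict.get?_insert, if_pos rfl]
      norm_num
    have H2 : ∀ s, (PySem.Dict.empty.insert n.toList (0:Int)).get? s ≠ none →
        ∃ j, j ≤ 0 ∧ s = orbS b.toNat n.toList j := by
      intro s hs
      rw [PySem.Dict.get?_insert] at hs
      by_cases hseq : s = n.toList
      · exact ⟨0, le_refl _, hseq⟩
      · rw [if_neg hseq, PySem.Dict.get?_empty] at hs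
        exact absurd rfl hs
    have := loopA_ok b hb2 hb10 n.toList hv ist jst hji heq hmin
      (10 ^ n.toList.length + 2) 0 (PySem.Dict.empty.insert n.toList (0:Int))
      (by omega) (by omega) H1 H2
    exact this
  -- B's tortoise-and-hare returns ist - jst as well
  have hB : solution_alt n b = ((ist - jst : Nat) : Int) := by
    unfold solution_alt
    have hstep1 : fstep b.toNat n.toList = orbS b.toNat n.toList 1 :=
      (orb_succ b.toNat n.toList 0).symm
    have h1 : stepB b n.toList = some (orbS b.toNat n.toList 1) := by
      rw [stepB_eq b hb2 hb10 _ hv, hstep1]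
    have hstep2 : fstep b.toNat (orbS b.toNat n.toList 1) = orbS b.toNat n.toList 2 :=
      (orb_succ b.toNat n.toList 1).symm
    have h2 : stepB b (orbS b.toNat n.toList 1) = some (orbS b.toNat n.toList 2) := by
      rw [stepB_eq b hb2 hb10 _ (hvalid 1).1, hstep2]
    rw [h1]
    dsimp only
    rw [h2]
    dsimp only
    -- the meeting exists within the fuel
    have hp1 : 1 ≤ ist - jst := by omega
    have hq1 : 1 ≤ (ist - jst) * (jst + 1) := by
      have := Nat.mul_le_mul (show 1 ≤ ist - jst by omega) (show 1 ≤ jst + 1 by omega)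
      omega
    have hqjst : jst ≤ (ist - jst) * (jst + 1) := by
      have : (jst + 1) * 1 ≤ (jst + 1) * (ist - jst) := Nat.mul_le_mul_left _ hp1
      have hc : (jst + 1) * (ist - jst) = (ist - jst) * (jst + 1) := by ring
      omega
    have hmeet : orbS b.toNat n.toList ((ist - jst) * (jst + 1))
        = orbS b.toNat n.toList (2 * ((ist - jst) * (jst + 1))) := by
      have hidx : 2 * ((ist - jst) * (jst + 1))
          = (ist - jst) * (jst + 1) + (jst + 1) * (ist - jst) := by ring
      rw [hidx]
      exact (op_mul b.toNat n.toList ist jst hji heq _ (jst + 1) hqjst).symm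
    have hXsq : (10 ^ n.toList.length + 2) * (10 ^ n.toList.length + 2)
        = 10 ^ n.toList.length * 10 ^ n.toList.length + 4 * 10 ^ n.toList.length + 4 := by ring
    have hqbound : (ist - jst) * (jst + 1) ≤ 10 ^ n.toList.length * 10 ^ n.toList.length :=
      Nat.mul_le_mul (by omega) (by omega)
    obtain ⟨s, hs1, hsmeet, hfl⟩ := floyd1_ok b hb2 hb10 n.toList hv
      ((10 ^ n.toList.length + 2) * (10 ^ n.toList.length + 2)) 0
      ⟨(ist - jst) * (jst + 1) - 1, by omega, by
        rw [show 0 + 1 + ((ist - jst) * (jst + 1) - 1) = (ist - jst) * (jst + 1) from by omega]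
        exact hmeet⟩
    have hfl' : floyd1 b ((10 ^ n.toList.length + 2) * (10 ^ n.toList.length + 2))
        (orbS b.toNat n.toList 1) (orbS b.toNat n.toList 2)
        = some (orbS b.toNat n.toList s) := by
      have e1 : (0 + 1 : Nat) = 1 := rfl
      have e2 : (2 * 0 + 2 : Nat) = 2 := rfl
      rw [e1, e2] at hfl
      exact hfl
    rw [hfl']
    dsimp only
    have hsteps : fstep b.toNat (orbS b.toNat n.toList s) = orbS b.toNat n.toList (s + 1) :=
      (orb_succ b.toNat n.toList s).symm
    rw [stepB_eq b hb2 hb10 _ (hvalid s).1, hsteps]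
    dsimp only
    have hjs : jst ≤ s :=
      op_lower b.toNat n.toList ist jst hji heq hmin s (2 * s) (by omega) hsmeet
    have hf2 := floyd2_ok b hb2 hb10 n.toList hv ist jst hji heq hmin s hjs
      ((10 ^ n.toList.length + 2) * (10 ^ n.toList.length + 2)) 1 1
      (le_refl _) (by omega) (by omega)
    rw [hf2]
    omega
  rw [hA, hB]
  omega
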